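-- pv_equiv track=rewrite | github.com/haolunc/ARC-RL | reference_solutions/solutions/9caf5b84.py | transform
-- ===== SOURCE A (Python) =====
-- from collections import Counter
--
-- def transform(grid):
--
--     flat = [cell for row in grid for cell in row]
--     counts = Counter(flat)
--
--     colors_sorted = sorted(counts.keys(), key=lambda c: (-counts[c], -c))
--     keep_colors = set(colors_sorted[:2])
--
--     result = []
--     for row in grid:
--         new_row = [val if val in keep_colors else 7 for val in row]
--         result.append(new_row)
--     return result
-- ===== SOURCE B (Python) =====
-- def transform(grid):
--     flat = [c for row in grid for c in row]
--     counts = {}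
--     for c in flat:
--         counts[c] = counts.get(c, 0) + 1
--     colors = list(counts)
--
--     def beats(d, c):
--         return counts[d] > counts[c] or (counts[d] == counts[c] and d > c)
--
--     # a color is kept iff fewer than two distinct colors rank strictly above it
--     keep = [c for c in colors if sum(1 for d in colors if beats(d, c)) < 2]
--     return [[v if v in keep else 7 for v in row] for row in grid]
-- ===== Notes on version B (the rewrite author's own statement) =====
-- stated objective: alternative
-- what changed: Replaces sorting all distinct colors and taking the first two with a rank-based selection: a color is kept iff fewer than two distinct colors beat it under (count, color) descending, so no sort is performed.
import Mathlib
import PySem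

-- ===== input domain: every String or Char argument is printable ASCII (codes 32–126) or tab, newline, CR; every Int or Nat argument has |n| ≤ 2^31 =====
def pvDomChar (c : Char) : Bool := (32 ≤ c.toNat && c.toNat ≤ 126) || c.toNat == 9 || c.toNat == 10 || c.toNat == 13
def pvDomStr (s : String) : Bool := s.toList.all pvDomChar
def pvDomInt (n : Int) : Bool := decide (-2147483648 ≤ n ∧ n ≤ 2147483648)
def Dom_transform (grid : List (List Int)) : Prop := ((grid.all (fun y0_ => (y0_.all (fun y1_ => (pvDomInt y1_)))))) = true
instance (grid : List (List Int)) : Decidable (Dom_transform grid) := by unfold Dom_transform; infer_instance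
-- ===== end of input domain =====

-- B replaces A's sort-then-take-two by a rank-based selection of the kept colors (alternative decomposition, no sort).

-- ===== PORT A =====
def transform (grid : List (List Int)) : List (List Int) :=
  let flat := grid.flatMap (fun row => row)
  let counts := PySem.Dict.counter flat
  let colors_sorted := PySem.List.sorted2 counts.keys (fun c => -(counts.getD c 0)) (fun c => -c) false
  let keep_colors := PySem.Set.ofList (colors_sorted.take 2)
  grid.map (fun row => row.map (fun val => if keep_colors.contains val then val else 7))

-- ===== PORT B =====
def transform_alt (grid : List (List Int)) : List (List Int) :=
  let flat := grid.flatMap (fun row => row)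
  let counts := flat.foldl (fun d c => d.insert c (d.getD c 0 + 1)) (PySem.Dict.empty : PySem.Dict Int Int)
  let colors := counts.keys
  let beats := fun (d c : Int) =>
    decide (counts.getD d 0 > counts.getD c 0) ||
      (decide (counts.getD d 0 = counts.getD c 0) && decide (d > c))
  let keep := colors.filter (fun c => colors.countP (fun d => beats d c) < 2)
  grid.map (fun row => row.map (fun v => if keep.contains v then v else 7))

-- ===== PRECONDITION & SPEC =====
def Spec_transform (grid : List (List Int)) (out : List (List Int)) : Prop := out = transform_alt grid
instance (grid : List (List Int)) (out : List (List Int)) : Decidable (Spec_transform grid out) := by unfold Spec_transform; infer_instance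

-- ===== CLAIM (what is proved, stated in full; the proofs are below) =====
def Claim_equal_transform : Prop := ∀ (grid : List (List Int)), Dom_transform grid → Spec_transform grid (transform grid)

-- ===== LEMMAS AND PROOFS =====

theorem pv_insertBy_pairwise {α : Type} (lt : α → α → Bool)
    (htr : ∀ a b c, lt a b = true → lt b c = true → lt a c = true)
    (has : ∀ a b, lt a b = true → lt b a = false)
    (x : α) (acc : List α) (h : acc.Pairwise (fun a b => lt b a = false)) :
    (PySem.List.insertBy lt x acc).Pairwise (fun a b => lt b a = false) := by
  induction acc with
  | nil => simp [PySem.List.insertBy]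
  | cons y ys ih =>
    rcases List.pairwise_cons.1 h with ⟨hy, hys⟩
    simp only [PySem.List.insertBy]
    by_cases hxy : lt x y = true
    · simp only [hxy, if_pos]
      refine List.pairwise_cons.2 ⟨?_, h⟩
      intro z hz
      rcases List.mem_cons.1 hz with rfl | hz'
      · exact has _ _ hxy
      · cases hzx : lt z x with
        | false => rfl
        | true =>
          have := htr _ _ _ hzx hxy
          rw [hy z hz'] at this
          simp at this
    · simp only [hxy, if_neg, Bool.false_eq_true, not_false_eq_true]
      refine List.pairwise_cons.2 ⟨?_, ih hys⟩
      intro z hz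
      rcases (PySem.List.mem_insertBy lt x z ys).1 hz with rfl | hz'
      · exact Bool.eq_false_iff.2 (fun hh => hxy hh)
      · exact hy z hz'

theorem pv_foldl_insertBy_pairwise {α : Type} (lt : α → α → Bool)
    (htr : ∀ a b c, lt a b = true → lt b c = true → lt a c = true)
    (has : ∀ a b, lt a b = true → lt b a = false)
    (xs : List α) :
    (xs.foldl (fun acc x => PySem.List.insertBy lt x acc) []).Pairwise
      (fun a b => lt b a = false) := by
  have gen : ∀ (xs acc : List α), acc.Pairwise (fun a b => lt b a = false) →
      (xs.foldl (fun acc x => PySem.List.insertBy lt x acc) acc).Pairwise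
        (fun a b => lt b a = false) := by
    intro xs
    induction xs with
    | nil => intro acc h; simpa using h
    | cons x xs ih =>
      intro acc h
      exact ih _ (pv_insertBy_pairwise lt htr has x acc h)
  exact gen xs [] (List.Pairwise.nil)

theorem pv_mem_take_iff_countP {α : Type} (lt : α → α → Bool)
    (has : ∀ a b, lt a b = true → lt b a = false)
    (t : List α) (hpw : t.Pairwise (fun a b => lt b a = false)) (hnd : t.Nodup)
    (htot : ∀ a b, a ≠ b → lt a b = true ∨ lt b a = true) :
    ∀ (n : Nat) (c : α), c ∈ t →
      (c ∈ t.take n ↔ t.countP (fun d => lt d c) < n) := by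
  induction t with
  | nil => simp
  | cons a u ih =>
    intro n c hc
    rcases List.pairwise_cons.1 hpw with ⟨ha, hu⟩
    rcases List.nodup_cons.1 hnd with ⟨hau, hndu⟩
    by_cases hca : c = a
    · subst hca
      have h0 : (c :: u).countP (fun d => lt d c) = 0 := by
        refine List.countP_eq_zero.2 ?_
        intro d hd
        rcases List.mem_cons.1 hd with rfl | hd'
        · intro hdd
          exact (Bool.eq_false_iff.1 (has _ _ hdd)) hdd
        · simp [ha d hd']
      rw [h0]
      cases n with
      | zero => simp
      | succ m => simp [List.take_succ_cons]
    · have hcu : c ∈ u := by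
        rcases List.mem_cons.1 hc with rfl | h
        · exact absurd rfl hca
        · exact h
      have hac : lt a c = true := by
        rcases htot a c (fun he => hca he.symm) with hh | hh
        · exact hh
        · rw [ha c hcu] at hh; simp at hh
      have hcnt : (a :: u).countP (fun d => lt d c) = u.countP (fun d => lt d c) + 1 := by
        simp [hac]
      rw [hcnt]
      cases n with
      | zero => simp
      | succ m =>
        rw [List.take_succ_cons]
        have hih := ih hu hndu m c hcu
        constructor
        · intro hmem
          rcases List.mem_cons.1 hmem with rfl | hm
          · exact absurd rfl hca
          · have := hih.1 hm; omega
        · intro hlt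
          exact List.mem_cons_of_mem a (hih.2 (by omega))

def pvLt (f : Int → Int) (a b : Int) : Bool :=
  decide (f a < f b) || (!decide (f b < f a) && decide (-a < -b))

theorem pvLt_trans (f : Int → Int) : ∀ a b c, pvLt f a b = true → pvLt f b c = true → pvLt f a c = true := by
  intro a b c
  simp only [pvLt, Bool.or_eq_true, Bool.and_eq_true, Bool.not_eq_true', decide_eq_true_eq,
    decide_eq_false_iff_not]
  omega

theorem pvLt_asym (f : Int → Int) : ∀ a b, pvLt f a b = true → pvLt f b a = false := by
  intro a b
  simp only [pvLt, Bool.or_eq_true, Bool.and_eq_true, Bool.not_eq_true', decide_eq_true_eq,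
    decide_eq_false_iff_not, Bool.or_eq_false_iff, Bool.and_eq_false_iff, Bool.not_eq_false',
    decide_eq_false_iff_not, decide_eq_true_eq]
  omega

theorem pvLt_total (f : Int → Int) : ∀ a b, a ≠ b → pvLt f a b = true ∨ pvLt f b a = true := by
  intro a b hne
  simp only [pvLt, Bool.or_eq_true, Bool.and_eq_true, Bool.not_eq_true', decide_eq_true_eq,
    decide_eq_false_iff_not]
  omega

theorem transform_spec' : ∀ (grid : List (List Int)), transform grid = transform_alt grid := by
  intro grid
  simp only [transform, transform_alt, PySem.Dict.foldl_insert_getD_add_one_eq_counter]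
  refine List.map_congr_left ?_
  intro row hrow
  refine List.map_congr_left ?_
  intro v hv
  have hmemflat : v ∈ grid.flatMap (fun row => row) := List.mem_flatMap.2 ⟨row, hrow, hv⟩
  -- abbreviations
  set flat := grid.flatMap (fun row => row) with hflat
  set cnts := PySem.Dict.counter flat with hcnts
  set keys := cnts.keys with hkeysdef
  have hvkeys : v ∈ keys := by
    rw [hkeysdef, hcnts, PySem.Dict.keys_counter]
    exact (PySem.Set.mem_ofList flat v).2 hmemflat
  have hndkeys : keys.Nodup := PySem.Dict.nodup_keys_counter flat
  set f := fun c : Int => -(cnts.getD c 0) with hf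
  set t := PySem.List.sorted2 keys (fun c => -(cnts.getD c 0)) (fun c => -c) false with ht
  have htfold : t = keys.foldl (fun acc x => PySem.List.insertBy (pvLt f) x acc) [] := rfl
  have hperm : t.Perm keys := PySem.List.sorted2_perm keys _ _ false
  have hpw : t.Pairwise (fun a b => pvLt f b a = false) := by
    rw [htfold]
    exact pv_foldl_insertBy_pairwise (pvLt f) (pvLt_trans f) (pvLt_asym f) keys
  have hndt : t.Nodup := (hperm.nodup_iff).2 hndkeys
  have hvt : v ∈ t := hperm.mem_iff.2 hvkeys
  have hrank := pv_mem_take_iff_countP (pvLt f) (pvLt_asym f) t hpw hndt (pvLt_total f) 2 v hvt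
  have hcountP : t.countP (fun d => pvLt f d v) = keys.countP (fun d => pvLt f d v) :=
    hperm.countP_eq _
  have hbeats : keys.countP (fun d =>
      decide (cnts.getD d 0 > cnts.getD v 0) ||
        (decide (cnts.getD d 0 = cnts.getD v 0) && decide (d > v))) =
      keys.countP (fun d => pvLt f d v) := by
    refine List.countP_congr ?_
    intro d _
    simp only [pvLt, hf, Bool.or_eq_true, Bool.and_eq_true, Bool.not_eq_true',
      decide_eq_true_eq, decide_eq_false_iff_not]
    omega
  -- the two kept-color membership tests agree
  have hcontains : ∀ (l : List Int), l.contains v = decide (v ∈ l) := fun l => by simp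
  have hiff : (v ∈ PySem.Set.ofList (t.take 2)) ↔
      v ∈ keys.filter (fun c => decide (List.countP (fun d =>
        decide (cnts.getD d 0 > cnts.getD c 0) ||
          (decide (cnts.getD d 0 = cnts.getD c 0) && decide (d > c))) keys < 2)) := by
    rw [PySem.Set.mem_ofList, hrank, List.mem_filter]
    constructor
    · intro h
      refine ⟨hvkeys, ?_⟩
      rw [hcountP, ← hbeats] at h
      simpa using h
    · rintro ⟨-, hp⟩
      rw [hcountP, ← hbeats]
      simpa using hp
  have hcond : (PySem.Set.ofList (t.take 2)).contains v =
      (keys.filter (fun c => decide (List.countP (fun d =>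
        decide (cnts.getD d 0 > cnts.getD c 0) ||
          (decide (cnts.getD d 0 = cnts.getD c 0) && decide (d > c))) keys < 2))).contains v := by
    have h1 : (PySem.Set.ofList (t.take 2)).contains v =
        decide (v ∈ PySem.Set.ofList (t.take 2)) := hcontains _
    rw [h1, hcontains]
    exact decide_eq_decide.2 hiff
  rw [hcond]
  rfl

-- ===== VERDICT (by name: the statement is the Claim_ definition above) =====
theorem transform_spec : Claim_equal_transform := by
  intro grid _
  exact transform_spec' grid
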